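-- pv_equiv track=rewrite | github.com/SeoHyungjun/Coding_Test | baekjun/solved.ac/level/silver/silver5/D-Day/D-Day.py | change_day
-- ===== SOURCE A (Python) =====
-- def change_day(st):
--     answer = 0
--
--     for year in range(st, st+1000):
--         if year % 400 == 0:
--             answer += 366
--         elif year % 100 == 0:
--             answer += 365
--         elif year % 4 == 0:
--             answer += 366
--         else:
--             answer += 365
--
--     return answer
-- ===== SOURCE B (Python) =====
-- def change_day(st):
--     def cnt(d):
--         # multiples of d in the inclusive range [st, st+999]
--         return (st + 999) // d - (st - 1) // d
--     return 365000 + cnt(4) - cnt(100) + cnt(400)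
-- ===== Notes on version B (the rewrite author's own statement) =====
-- stated objective: alternative
-- what changed: Replaces the year-by-year scan over the 1000-year range with a closed-form count of leap years via floor-division inclusion-exclusion (multiples of 4 minus 100 plus 400).
import Mathlib
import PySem

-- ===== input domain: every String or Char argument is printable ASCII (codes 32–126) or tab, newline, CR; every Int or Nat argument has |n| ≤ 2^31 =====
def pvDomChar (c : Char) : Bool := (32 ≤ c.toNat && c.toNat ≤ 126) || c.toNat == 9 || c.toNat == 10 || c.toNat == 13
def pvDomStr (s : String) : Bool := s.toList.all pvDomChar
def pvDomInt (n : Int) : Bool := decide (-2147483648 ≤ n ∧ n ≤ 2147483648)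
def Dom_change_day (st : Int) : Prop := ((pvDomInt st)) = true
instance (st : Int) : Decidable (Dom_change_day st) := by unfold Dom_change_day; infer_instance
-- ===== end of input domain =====

-- B replaces A's year-by-year loop with a closed-form leap-year count via floor-division inclusion-exclusion (alternative algorithm; speedup not measured).

-- ===== PORT A =====
def change_day (st : Int) : Int :=
  (PySem.List.pyRange st (st + 1000) 1).foldl
    (fun answer year =>
      if PySem.Int.mod year 400 = 0 then answer + 366
      else if PySem.Int.mod year 100 = 0 then answer + 365
      else if PySem.Int.mod year 4 = 0 then answer + 366
      else answer + 365) 0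

-- ===== PORT B =====
-- cnt d = number of multiples of d in [st, st+999]
def change_day_cnt (st d : Int) : Int :=
  PySem.Int.floordiv (st + 999) d - PySem.Int.floordiv (st - 1) d

def change_day_alt (st : Int) : Int :=
  365000 + change_day_cnt st 4 - change_day_cnt st 100 + change_day_cnt st 400

-- ===== PRECONDITION & SPEC =====
def Spec_change_day (st : Int) (out : Int) : Prop := out = change_day_alt st
instance (st : Int) (out : Int) : Decidable (Spec_change_day st out) := by unfold Spec_change_day; infer_instance

-- ===== CLAIM (what is proved, stated in full; the proofs are below) =====
def Claim_equal_change_day : Prop := ∀ (st : Int), Dom_change_day st → Spec_change_day st (change_day st)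

-- ===== LEMMAS AND PROOFS =====

-- one step of the running floor-division counter: it bumps exactly at multiples
lemma fd_step (m d : Int) (hd : 0 < d) :
    PySem.Int.floordiv m d - PySem.Int.floordiv (m - 1) d
      = if PySem.Int.mod m d = 0 then 1 else 0 := by
  have hmd := PySem.Int.floordiv_mul_add_mod m d
  have hr0 : 0 ≤ PySem.Int.mod m d := by
    rw [PySem.Int.mod_eq_emod_of_pos hd]; exact Int.emod_nonneg m (by omega)
  have hrd : PySem.Int.mod m d < d := by
    rw [PySem.Int.mod_eq_emod_of_pos hd]; exact Int.emod_lt_of_pos m hd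
  split_ifs with h
  · have he : PySem.Int.floordiv (m - 1) d = PySem.Int.floordiv m d - 1 := by
      rw [PySem.Int.floordiv_eq_iff_of_pos hd]
      constructor <;> nlinarith
    omega
  · have hr1 : 1 ≤ PySem.Int.mod m d := by omega
    have he : PySem.Int.floordiv (m - 1) d = PySem.Int.floordiv m d := by
      rw [PySem.Int.floordiv_eq_iff_of_pos hd]
      constructor <;> nlinarith
    omega

lemma loop_closed (n : Nat) (a : Int) :
    (PySem.List.pyRange a (a + n) 1).foldl
      (fun answer year =>
        if PySem.Int.mod year 400 = 0 then answer + 366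
        else if PySem.Int.mod year 100 = 0 then answer + 365
        else if PySem.Int.mod year 4 = 0 then answer + 366
        else answer + 365) 0
    = 365 * n
      + (PySem.Int.floordiv (a + n - 1) 4 - PySem.Int.floordiv (a - 1) 4)
      - (PySem.Int.floordiv (a + n - 1) 100 - PySem.Int.floordiv (a - 1) 100)
      + (PySem.Int.floordiv (a + n - 1) 400 - PySem.Int.floordiv (a - 1) 400) := by
  induction n with
  | zero =>
    rw [PySem.List.pyRange_one_eq_nil (by omega)]
    simp
  | succ k ih =>
    have hsplit : a + ((k : Int) + 1) = (a + k) + 1 := by ring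
    rw [show ((k + 1 : Nat) : Int) = (k : Int) + 1 by push_cast; ring, hsplit,
        PySem.List.pyRange_one_succ_right (by omega), List.foldl_append, ih]
    simp only [List.foldl]
    have e4 := fd_step (a + k) 4 (by norm_num)
    have e100 := fd_step (a + k) 100 (by norm_num)
    have e400 := fd_step (a + k) 400 (by norm_num)
    have hdvd : PySem.Int.mod (a + k) 400 = 0 → PySem.Int.mod (a + k) 100 = 0 := by
      rw [PySem.Int.mod_eq_zero_iff_dvd, PySem.Int.mod_eq_zero_iff_dvd]
      exact fun h => dvd_trans (by norm_num) h
    have hdvd2 : PySem.Int.mod (a + k) 100 = 0 → PySem.Int.mod (a + k) 4 = 0 := by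
      rw [PySem.Int.mod_eq_zero_iff_dvd, PySem.Int.mod_eq_zero_iff_dvd]
      exact fun h => dvd_trans (by norm_num) h
    have harr : a + (k : Int) + 1 - 1 = a + k := by ring
    rw [harr] at *
    split_ifs with h1 h2 h3 <;>
      simp_all <;> omega

-- ===== VERDICT (by name: the statement is the Claim_ definition above) =====
theorem change_day_spec : Claim_equal_change_day := by
  intro st _
  unfold Spec_change_day change_day change_day_alt change_day_cnt
  have h := loop_closed 1000 st
  rw [show ((1000 : Nat) : Int) = 1000 by norm_num] at h
  rw [h]
  ring_nf
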